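-- pv_equiv track=rewrite | github.com/chanjin1998/Algoritms | 프로그래머스/1/42576. 완주하지 못한 선수/완주하지 못한 선수.py | solution
-- ===== SOURCE A (Python) =====
-- def solution(participant, completion):
--     d = dict()
--     res = []
--     for i in participant:
--         if i in d:
--             d[i] += 1
--         else:
--             d[i] = 1
--     for i in completion:
--         if i in d:
--             d[i] -= 1
--     for i in d.keys():
--         if d[i]>= 1:
--             res.append(i)
--
--     return "".join(res)
-- ===== SOURCE B (Python) =====
-- def solution(participant, completion):
--     # For each distinct name in participant (first-seen order), keep it iff it
--     # occurs strictly more often in participant than in completion.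
--     seen = set()
--     out = []
--     for n in participant:
--         if n not in seen:
--             seen.add(n)
--             if participant.count(n) > completion.count(n):
--                 out.append(n)
--     return "".join(out)
-- ===== Notes on version B (the rewrite author's own statement) =====
-- stated objective: alternative
-- what changed: Replaces A's three passes over a mutable count table (build dict, subtract completions, filter keys) with a single loop over participant that, at each first occurrence of a name, decides membership directly by comparing participant.count(n) with completion.count(n); no count table is ever built.
import Mathlib
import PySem

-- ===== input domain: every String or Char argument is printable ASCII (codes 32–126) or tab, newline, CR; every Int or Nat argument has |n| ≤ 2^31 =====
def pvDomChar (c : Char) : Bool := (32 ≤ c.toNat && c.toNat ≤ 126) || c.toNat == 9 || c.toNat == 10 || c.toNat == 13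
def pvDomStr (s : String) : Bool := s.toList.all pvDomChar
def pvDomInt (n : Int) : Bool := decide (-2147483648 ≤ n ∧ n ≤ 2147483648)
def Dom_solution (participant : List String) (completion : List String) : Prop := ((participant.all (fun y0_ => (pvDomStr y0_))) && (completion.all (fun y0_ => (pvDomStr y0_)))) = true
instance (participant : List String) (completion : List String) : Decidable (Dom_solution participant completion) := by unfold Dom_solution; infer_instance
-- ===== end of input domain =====

-- ===== PORT A =====
-- B replaces A's three passes over a count table (build, subtract, filter) by one
-- loop deciding each first-seen name via list counts; objective: alternative.
def solution (participant : List String) (completion : List String) : String :=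
  let d : PySem.Dict String Int :=
    participant.foldl (fun d i =>
      if d.contains i then d.insert i (d.getD i 0 + 1) else d.insert i 1)
      PySem.Dict.empty
  let d2 : PySem.Dict String Int :=
    completion.foldl (fun d i =>
      if d.contains i then d.insert i (d.getD i 0 - 1) else d) d
  let res : List String :=
    (PySem.Dict.keys d2).foldl (fun res i =>
      if 1 ≤ d2.getD i 0 then res ++ [i] else res) []
  PySem.Str.join "" res

-- ===== PORT B =====
def solution_alt (participant : List String) (completion : List String) : String :=
  let st : PySem.Set String × List String :=
    participant.foldl (fun st n =>
      if PySem.Set.contains st.1 n then st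
      else (PySem.Set.add st.1 n,
            if PySem.List.count completion n < PySem.List.count participant n
            then st.2 ++ [n] else st.2))
      (PySem.Set.empty, [])
  PySem.Str.join "" st.2

-- ===== PRECONDITION & SPEC =====
def Spec_solution (participant : List String) (completion : List String) (out : String) : Prop := out = solution_alt participant completion
instance (participant : List String) (completion : List String) (out : String) : Decidable (Spec_solution participant completion out) := by unfold Spec_solution; infer_instance

-- ===== CLAIM (what is proved, stated in full; the proofs are below) =====
def Claim_equal_solution : Prop := ∀ (participant : List String) (completion : List String), Dom_solution participant completion → Spec_solution participant completion (solution participant completion)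

-- ===== LEMMAS AND PROOFS =====

-- A's first loop is the Counter loop.
theorem buildA_eq_counter (p : List String) :
    p.foldl (fun (d : PySem.Dict String Int) i =>
      if d.contains i then d.insert i (d.getD i 0 + 1) else d.insert i 1)
      PySem.Dict.empty = PySem.Dict.counter p := by
  rw [← PySem.Dict.foldl_insert_getD_add_one_eq_counter]
  apply PySem.List.foldl_congr_mem
  intro d x _
  by_cases h : d.contains x
  · simp [h]
  · rw [if_neg (by simp [h]), PySem.Dict.getD_of_not_contains d 0 (by simpa using h)]
    norm_num

-- The decrement loop: every lookup after it.
theorem decLoop_get? (c : List String) (d : PySem.Dict String Int) (k : String) :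
    (c.foldl (fun (d : PySem.Dict String Int) i =>
        if d.contains i then d.insert i (d.getD i 0 - 1) else d) d).get? k
      = (d.get? k).map (fun v => v - (List.count k c : Int)) := by
  induction c generalizing d with
  | nil => cases h : d.get? k <;> simp [h]
  | cons i t ih =>
    simp only [List.foldl_cons]
    by_cases hc : d.contains i
    · rw [if_pos hc, ih]
      by_cases hk : k = i
      · subst hk
        have hs : d.get? k = some (d.getD k 0) := by
          rw [PySem.Dict.contains_eq_isSome_get?] at hc
          cases h : d.get? k with
          | none => rw [h] at hc; simp at hc
          | some v => rw [PySem.Dict.getD_of_get?_eq_some d 0 h]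
        rw [PySem.Dict.get?_insert_self, hs]
        simp only [Option.map_some, List.count_cons_self]
        push_cast
        ring_nf
      · rw [PySem.Dict.get?_insert_of_ne d _ hk]
        rw [List.count_cons_of_ne (by exact fun h => hk h.symm)]
    · rw [if_neg hc, ih]
      by_cases hk : k = i
      · subst hk
        have h0 : d.get? k = none := by
          rw [PySem.Dict.contains_eq_isSome_get?] at hc
          cases h : d.get? k with
          | none => rfl
          | some v => rw [h] at hc; simp at hc
        simp [h0]
      · rw [List.count_cons_of_ne (by exact fun h => hk h.symm)]

-- The decrement loop does not change the key list.
theorem decLoop_keys (c : List String) (d : PySem.Dict String Int) :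
    (c.foldl (fun (d : PySem.Dict String Int) i =>
        if d.contains i then d.insert i (d.getD i 0 - 1) else d) d).keys = d.keys := by
  induction c generalizing d with
  | nil => rfl
  | cons i t ih =>
    simp only [List.foldl_cons]
    by_cases hc : d.contains i
    · rw [if_pos hc, ih, PySem.Dict.keys_insert_of_contains d _ hc]
    · rw [if_neg hc, ih]

theorem counter_get? (p : List String) (n : String) (hn : n ∈ p) :
    (PySem.Dict.counter p).get? n = some (List.count n p : Int) := by
  have hc : (PySem.Dict.counter p).contains n = true := by
    rw [PySem.Dict.contains_counter]; simpa using hn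
  rw [PySem.Dict.contains_eq_isSome_get?] at hc
  cases h : (PySem.Dict.counter p).get? n with
  | none => rw [h] at hc; simp at hc
  | some v =>
      have hd := PySem.Dict.getD_counter p n
      rw [PySem.Dict.getD_eq_get?_getD, h] at hd
      simp only [Option.getD_some] at hd
      rw [hd]

-- Set.add, unfolded by a contains hypothesis.
theorem add_of_contains (s : PySem.Set String) (x : String)
    (hx : PySem.Set.contains s x = true) : PySem.Set.add s x = s := by
  have hm : x ∈ s := (PySem.Set.contains_iff s x).mp hx
  simp [PySem.Set.add, hm]

theorem add_of_not_contains (s : PySem.Set String) (x : String)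
    (hx : ¬ PySem.Set.contains s x = true) : PySem.Set.add s x = s ++ [x] := by
  have hm : x ∉ s := fun h => hx ((PySem.Set.contains_iff s x).mpr h)
  simp [PySem.Set.add, hm]

-- Set.update extends the set on the right.
theorem update_append (l : List String) (s : PySem.Set String) :
    ∃ w, PySem.Set.update s l = s ++ w := by
  induction l generalizing s with
  | nil => exact ⟨[], by simp [PySem.Set.update]⟩
  | cons x t ih =>
    by_cases hx : PySem.Set.contains s x
    · have h1 : PySem.Set.update s (x :: t) = PySem.Set.update s t := by
        simp [PySem.Set.update, add_of_contains s x hx]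
      rw [h1]; exact ih s
    · have h1 : PySem.Set.update s (x :: t) = PySem.Set.update (s ++ [x]) t := by
        simp [PySem.Set.update, add_of_not_contains s x hx]
      obtain ⟨w, hw⟩ := ih (s ++ [x])
      exact ⟨x :: w, by rw [h1, hw]; simp⟩

-- B's loop, characterised with a fresh-elements helper.
def freshB (completion : List String) (participant : List String) :
    List String → PySem.Set String → List String
  | [], _ => []
  | x :: t, s =>
      if PySem.Set.contains s x then freshB completion participant t s
      else (if PySem.List.count completion x < PySem.List.count participant x
            then [x] else []) ++ freshB completion participant t (PySem.Set.add s x)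

theorem loopB_eq (c p l : List String) (s : PySem.Set String) (out : List String) :
    l.foldl (fun (st : PySem.Set String × List String) n =>
      if PySem.Set.contains st.1 n then st
      else (PySem.Set.add st.1 n,
            if PySem.List.count c n < PySem.List.count p n
            then st.2 ++ [n] else st.2)) (s, out)
      = (PySem.Set.update s l, out ++ freshB c p l s) := by
  induction l generalizing s out with
  | nil => simp [freshB, PySem.Set.update]
  | cons x t ih =>
    simp only [List.foldl_cons, freshB]
    by_cases hx : PySem.Set.contains s x
    · rw [if_pos hx, ih]
      have h1 : PySem.Set.update s (x :: t) = PySem.Set.update s t := by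
        simp [PySem.Set.update, add_of_contains s x hx]
      rw [h1, if_pos hx]
    · rw [if_neg hx]
      have h1 : PySem.Set.update s (x :: t) = PySem.Set.update (PySem.Set.add s x) t := by
        simp [PySem.Set.update]
      have hm : x ∉ s := fun h => hx ((PySem.Set.contains_iff s x).mpr h)
      by_cases hcnt : PySem.List.count c x < PySem.List.count p x
      · rw [if_pos hcnt, ih, h1, if_pos hcnt]
        simp [hm]
      · rw [if_neg hcnt, ih, h1, if_neg hcnt]
        simp [hm]

-- fresh elements = the new tail of the set, filtered by the count test.
theorem freshB_eq_filter (c p : List String) (l : List String) (s : PySem.Set String) :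
    freshB c p l s = ((PySem.Set.update s l).drop s.length).filter
      (fun n => decide (PySem.List.count c n < PySem.List.count p n)) := by
  induction l generalizing s with
  | nil => simp [freshB, PySem.Set.update]
  | cons x t ih =>
    simp only [freshB]
    by_cases hx : PySem.Set.contains s x
    · have h1 : PySem.Set.update s (x :: t) = PySem.Set.update s t := by
        simp [PySem.Set.update, add_of_contains s x hx]
      rw [if_pos hx, h1, ih]
    · have h1 : PySem.Set.update s (x :: t) = PySem.Set.update (s ++ [x]) t := by
        simp [PySem.Set.update, add_of_not_contains s x hx]
      have hadd : PySem.Set.add s x = s ++ [x] := add_of_not_contains s x hx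
      obtain ⟨w, hw⟩ := update_append t (s ++ [x])
      have hdrop1 : (PySem.Set.update (s ++ [x]) t).drop s.length = x :: w := by
        rw [hw, List.append_assoc]
        simp
      have hdrop2 : (PySem.Set.update (s ++ [x]) t).drop (s ++ [x]).length = w := by
        rw [hw]; simp
      rw [if_neg hx, ih, hadd, hdrop2, h1, hdrop1]
      rw [List.filter_cons]
      by_cases hcnt : PySem.List.count c x < PySem.List.count p x
      · rw [if_pos hcnt, if_pos (by simpa using hcnt)]
        simp
      · rw [if_neg hcnt, if_neg (by simpa using hcnt)]
        simp

-- ===== VERDICT (by name: the statement is the Claim_ definition above) =====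
theorem solution_spec : Claim_equal_solution := by
  intro p c _
  unfold Spec_solution solution solution_alt
  dsimp only
  rw [buildA_eq_counter, loopB_eq, freshB_eq_filter]
  have hkeys : (c.foldl (fun (d : PySem.Dict String Int) i =>
      if d.contains i then d.insert i (d.getD i 0 - 1) else d)
      (PySem.Dict.counter p)).keys = PySem.Set.ofList p := by
    rw [decLoop_keys, PySem.Dict.keys_counter]
  rw [PySem.List.foldl_append_ite_eq_filter, hkeys]
  have hofl : PySem.Set.update PySem.Set.empty p = PySem.Set.ofList p := rfl
  rw [hofl]
  simp only [PySem.Set.empty, List.length_nil, List.drop_zero, List.nil_append]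
  congr 1
  apply List.filter_congr
  intro n hn
  have hnp : n ∈ p := (PySem.Set.mem_ofList p n).mp hn
  have hget : (c.foldl (fun (d : PySem.Dict String Int) i =>
      if d.contains i then d.insert i (d.getD i 0 - 1) else d)
      (PySem.Dict.counter p)).getD n 0
      = (List.count n p : Int) - (List.count n c : Int) := by
    rw [PySem.Dict.getD_eq_get?_getD, decLoop_get?, counter_get? p n hnp]
    simp
  rw [hget]
  simp only [decide_eq_decide, PySem.List.count_eq]
  omega
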